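-- pv_equiv track=rewrite | github.com/lucaspdc21/trabalho_fup | damas.py | contar_caractere
-- ===== SOURCE A (Python) =====
-- def contar_caractere(matriz, peca, dama):
--     contador_de_elem = 0
--     for linha in matriz:
--         for elemento in linha:
--             if elemento == peca:
--                 contador_de_elem += 1
--             if elemento == dama:
--                 contador_de_elem += 1
--     return contador_de_elem
-- ===== SOURCE B (Python) =====
-- def contar_caractere(matriz, peca, dama):
--     plano = [e for linha in matriz for e in linha]
--
--     def conta(seg):
--         if len(seg) == 0:
--             return 0
--         if len(seg) == 1:
--             return (seg[0] == peca) + (seg[0] == dama)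
--         meio = len(seg) // 2
--         return conta(seg[:meio]) + conta(seg[meio:])
--
--     return conta(plano)
-- ===== Notes on version B (the rewrite author's own statement) =====
-- stated objective: alternative
-- what changed: Replaced the nested accumulator loops by flattening the matrix once and counting the two targets with a divide-and-conquer binary recursion over halved segments.
import Mathlib
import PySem

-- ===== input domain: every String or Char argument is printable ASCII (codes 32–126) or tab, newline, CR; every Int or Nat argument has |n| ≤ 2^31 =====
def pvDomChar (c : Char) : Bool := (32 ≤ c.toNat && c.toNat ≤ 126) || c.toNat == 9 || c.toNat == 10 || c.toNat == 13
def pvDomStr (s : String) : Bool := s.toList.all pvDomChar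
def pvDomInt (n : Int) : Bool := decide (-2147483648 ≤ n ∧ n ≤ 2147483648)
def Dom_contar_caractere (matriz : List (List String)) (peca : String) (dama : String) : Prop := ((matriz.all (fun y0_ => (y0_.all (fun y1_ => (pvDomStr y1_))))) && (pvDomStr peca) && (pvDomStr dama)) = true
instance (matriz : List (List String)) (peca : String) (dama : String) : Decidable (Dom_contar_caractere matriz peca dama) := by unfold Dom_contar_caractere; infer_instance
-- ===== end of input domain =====

-- B flattens the matrix once and counts the two targets by divide-and-conquer binary recursion over halved segments, instead of A's nested accumulator loops; objective: alternative.


-- ===== PORT A =====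
def contar_caractere (matriz : List (List String)) (peca : String) (dama : String) : Int :=
  matriz.foldl (fun contador linha =>
    linha.foldl (fun c elemento =>
      let c := if elemento == peca then c + 1 else c
      if elemento == dama then c + 1 else c) contador) 0

-- ===== PORT B =====
-- helper 'conta': divide-and-conquer count of the two targets on a segment.
-- Python's seg[:meio] / seg[meio:] with 0 ≤ meio ≤ len(seg) are exactly List.take / List.drop (nonneg in-range slice).
def pvConta (peca dama : String) (seg : List String) : Int :=
  match seg with
  | [] => 0
  | [e] => (if e == peca then (1 : Int) else 0) + (if e == dama then (1 : Int) else 0)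
  | x :: y :: rest =>
      let s := x :: y :: rest
      let meio := s.length / 2
      pvConta peca dama (s.take meio) + pvConta peca dama (s.drop meio)
termination_by seg.length
decreasing_by
  · simp [List.length_take]; omega
  · simp; omega

def contar_caractere_alt (matriz : List (List String)) (peca : String) (dama : String) : Int :=
  let plano := matriz.flatMap (fun linha => linha)
  pvConta peca dama plano

-- ===== PRECONDITION & SPEC =====
def Spec_contar_caractere (matriz : List (List String)) (peca : String) (dama : String) (out : Int) : Prop := out = contar_caractere_alt matriz peca dama
instance (matriz : List (List String)) (peca : String) (dama : String) (out : Int) : Decidable (Spec_contar_caractere matriz peca dama out) := by unfold Spec_contar_caractere; infer_instance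

-- ===== CLAIM =====
def Claim_equal_contar_caractere : Prop := ∀ (matriz : List (List String)) (peca : String) (dama : String), Dom_contar_caractere matriz peca dama → Spec_contar_caractere matriz peca dama (contar_caractere matriz peca dama)

-- ===== LEMMAS AND PROOFS =====
theorem inner_count (peca dama : String) (l : List String) (acc : Int) :
    l.foldl (fun c elemento =>
      let c := if elemento == peca then c + 1 else c
      if elemento == dama then c + 1 else c) acc
    = acc + l.count peca + l.count dama := by
  induction l generalizing acc with
  | nil => simp
  | cons x xs ih =>
    simp only [List.foldl_cons, List.count_cons]
    rw [ih]
    by_cases hp : x = peca <;> by_cases hd : x = dama <;>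
      simp [hp, hd] <;> split_ifs <;> simp_all <;> omega

theorem outer_count (peca dama : String) (m : List (List String)) (acc : Int) :
    m.foldl (fun contador linha =>
      linha.foldl (fun c elemento =>
        let c := if elemento == peca then c + 1 else c
        if elemento == dama then c + 1 else c) contador) acc
    = acc + ((m.flatMap (fun l => l)).count peca : Int)
          + ((m.flatMap (fun l => l)).count dama : Int) := by
  induction m generalizing acc with
  | nil => simp
  | cons x xs ih =>
    simp only [List.foldl_cons]
    rw [inner_count, ih]
    simp only [List.flatMap_cons, List.count_append]
    push_cast
    ring

theorem pvConta_count (peca dama : String) (l : List String) :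
    pvConta peca dama l = (l.count peca : Int) + (l.count dama : Int) := by
  induction l using pvConta.induct with
  | case1 => simp [pvConta]
  | case2 e =>
    simp only [pvConta, List.count_cons, List.count_nil]
    by_cases hp : e = peca <;> by_cases hd : e = dama <;> simp [hp, hd]
  | case3 x y rest s meio ih1 ih2 =>
    rw [pvConta, ih1, ih2]
    have hc : ∀ s : String,
        ((x :: y :: rest).take ((x :: y :: rest).length / 2)).count s
          + ((x :: y :: rest).drop ((x :: y :: rest).length / 2)).count s
        = (x :: y :: rest).count s := by
      intro s
      rw [← List.count_append, List.take_append_drop]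
    rw [← hc peca, ← hc dama]
    push_cast
    ring

-- ===== VERDICT =====
theorem contar_caractere_spec : Claim_equal_contar_caractere := by
  intro matriz peca dama _
  unfold Spec_contar_caractere contar_caractere contar_caractere_alt
  rw [outer_count, pvConta_count]
  ring
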